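-- pv_equiv track=rewrite | github.com/sunilsoni/interview-notes-python | com/interview/2026/april/linkedin/test2.py | get_connection_distance
-- ===== SOURCE A (Python) =====
-- from collections import deque
--
-- def get_connection_distance(network_graph, start_id, target_id):
--     # We now check if the IDs exist in our network graph
--     if start_id not in network_graph or target_id not in network_graph:
--         return -1
--
--     # If the start ID is the same as the target ID, distance is 0 steps
--     if start_id == target_id:
--         return 0
--
--     # Our queue now holds tuples of: (current_member_id, current_distance)
--     # We start with the starting ID at distance 0
--     search_queue = deque([(start_id, 0)])
--
--     # Our visited set tracks the unique IDs we've already checked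
--     # This prevents infinite loops if two people are mutual friends
--     visited = set([start_id])
--
--     # Keep searching as long as there are IDs in the queue
--     while search_queue:
--         # Pull the next ID and its distance from the front of the line
--         current_id, current_distance = search_queue.popleft()
--
--         # If we found the target ID, we are done! Return the distance.
--         if current_id == target_id:
--             return current_distance
--
--         # Look up the friends list using the current ID
--         for friend_id in network_graph.get(current_id, []):
--             # Check if we haven't visited this ID yet
--             if friend_id not in visited:
--                 # Mark them as visited
--                 visited.add(friend_id)
--                 # Add the friend's ID to the back of the queue, adding 1 to the distance
--                 search_queue.append((friend_id, current_distance + 1))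
--
--     # If the queue empties out and we never found the target ID, they aren't connected
--     return -1
-- ===== SOURCE B (Python) =====
-- def get_connection_distance(network_graph, start_id, target_id):
--     # Same guards as the task states: unknown IDs -> -1, identical IDs -> 0
--     if start_id not in network_graph or target_id not in network_graph:
--         return -1
--     if start_id == target_id:
--         return 0
--
--     # Level-synchronous BFS: whole layers + a level counter instead of a
--     # queue of (id, distance) tuples.
--     frontier = [start_id]
--     visited = {start_id}
--     level = 0
--     while frontier:
--         if target_id in frontier:
--             return level
--         next_frontier = []
--         for node in frontier:
--             for friend_id in network_graph.get(node, []):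
--                 if friend_id not in visited:
--                     visited.add(friend_id)
--                     next_frontier.append(friend_id)
--         frontier = next_frontier
--         level += 1
--     return -1
-- ===== Notes on version B (the rewrite author's own statement) =====
-- stated objective: alternative
-- what changed: Replaces the deque of (id, distance) tuples with level-synchronous BFS: a frontier list, a visited set and a level counter, expanding one whole layer per iteration.
import Mathlib
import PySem

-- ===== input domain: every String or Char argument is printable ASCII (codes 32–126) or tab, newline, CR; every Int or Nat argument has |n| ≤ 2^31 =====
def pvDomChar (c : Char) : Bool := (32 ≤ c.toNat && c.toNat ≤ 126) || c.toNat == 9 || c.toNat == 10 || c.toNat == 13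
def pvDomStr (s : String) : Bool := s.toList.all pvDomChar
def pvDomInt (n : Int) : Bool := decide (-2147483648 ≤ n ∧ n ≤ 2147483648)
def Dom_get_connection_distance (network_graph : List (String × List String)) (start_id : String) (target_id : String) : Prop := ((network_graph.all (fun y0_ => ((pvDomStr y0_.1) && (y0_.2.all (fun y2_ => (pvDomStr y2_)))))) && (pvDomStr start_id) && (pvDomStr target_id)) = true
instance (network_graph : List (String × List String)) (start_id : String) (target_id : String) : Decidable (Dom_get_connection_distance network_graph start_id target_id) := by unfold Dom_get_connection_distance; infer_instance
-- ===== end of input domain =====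

-- B replaces A's deque of (id, distance) tuples by level-synchronous BFS (frontier list + level counter); same results, a different decomposition (objective: alternative).

-- ===== PORT A =====
-- network_graph.get(c, [])
def pvNbrs (g : List (String × List String)) (c : String) : List String :=
  ((PySem.Dict.mk g).get? c).getD []

-- fuel bound for the BFS loops; provably sufficient (the totality argument is in the lemmas below)
def pvFuel (g : List (String × List String)) : Nat :=
  (g.flatMap Prod.snd).length + 1

-- A's while-loop: queue of (current_id, current_distance) and the visited set; the fuel only makes the recursion structural
def bfsA (g : List (String × List String)) (t : String) :
    Nat → List (String × Int) → PySem.Set String → Int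
  | 0, _, _ => -1
  | _ + 1, [], _ => -1
  | f + 1, (c, d) :: q, vis =>
    if c = t then d
    else
      let st := (pvNbrs g c).foldl
        (fun (acc : List (String × Int) × PySem.Set String) fr =>
          if PySem.Set.contains acc.2 fr then acc
          else (acc.1 ++ [(fr, d + 1)], PySem.Set.add acc.2 fr)) (q, vis)
      bfsA g t f st.1 st.2

def get_connection_distance (network_graph : List (String × List String)) (start_id : String) (target_id : String) : Int :=
  if ¬ PySem.Dict.contains (PySem.Dict.mk network_graph) start_id ∨
     ¬ PySem.Dict.contains (PySem.Dict.mk network_graph) target_id then -1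
  else if start_id = target_id then 0
  else bfsA network_graph target_id (pvFuel network_graph)
        [(start_id, 0)] (PySem.Set.ofList [start_id])

-- ===== PORT B =====
-- one whole BFS layer: for node in frontier / for friend_id in graph.get(node, [])
def pvExpand (g : List (String × List String)) (frontier : List String)
    (vis : PySem.Set String) : List String × PySem.Set String :=
  frontier.foldl (fun acc node =>
    (pvNbrs g node).foldl (fun acc2 nb =>
      if PySem.Set.contains acc2.2 nb then acc2
      else (acc2.1 ++ [nb], PySem.Set.add acc2.2 nb)) acc) ([], vis)

-- B's while-loop: frontier + level counter
def bfsB (g : List (String × List String)) (t : String) :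
    Nat → List String → PySem.Set String → Int → Int
  | 0, _, _, _ => -1
  | f + 1, frontier, vis, level =>
    if frontier = [] then -1
    else if t ∈ frontier then level
    else
      let st := pvExpand g frontier vis
      bfsB g t f st.1 st.2 (level + 1)

def get_connection_distance_alt (network_graph : List (String × List String)) (start_id : String) (target_id : String) : Int :=
  if ¬ PySem.Dict.contains (PySem.Dict.mk network_graph) start_id ∨
     ¬ PySem.Dict.contains (PySem.Dict.mk network_graph) target_id then -1
  else if start_id = target_id then 0
  else bfsB network_graph target_id (pvFuel network_graph)
        [start_id] (PySem.Set.ofList [start_id]) 0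

-- ===== PRECONDITION & SPEC =====
def Spec_get_connection_distance (network_graph : List (String × List String)) (start_id : String) (target_id : String) (out : Int) : Prop := out = get_connection_distance_alt network_graph start_id target_id
instance (network_graph : List (String × List String)) (start_id : String) (target_id : String) (out : Int) : Decidable (Spec_get_connection_distance network_graph start_id target_id out) := by unfold Spec_get_connection_distance; infer_instance

-- ===== CLAIM (what is proved, stated in full; the proofs are below) =====
def Claim_equal_get_connection_distance : Prop := ∀ (network_graph : List (String × List String)) (start_id : String) (target_id : String), Dom_get_connection_distance network_graph start_id target_id → Spec_get_connection_distance network_graph start_id target_id (get_connection_distance network_graph start_id target_id)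


-- ===== LEMMAS AND PROOFS =====

-- the new (previously unvisited) elements of a neighbour list, and the visited set afterwards
def collectNew (vis : PySem.Set String) : List String → List String × PySem.Set String
  | [] => ([], vis)
  | nb :: rest =>
    if PySem.Set.contains vis nb then collectNew vis rest
    else
      let p := collectNew (PySem.Set.add vis nb) rest
      (nb :: p.1, p.2)

-- the new elements contributed by a whole frontier, and the visited set afterwards
def collectLevel (g : List (String × List String)) (vis : PySem.Set String) :
    List String → List String × PySem.Set String
  | [] => ([], vis)
  | c :: rest =>
    let p := collectNew vis (pvNbrs g c)
    let q := collectLevel g p.2 rest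
    (p.1 ++ q.1, q.2)

theorem collectNew_fst_subset (ns : List String) : ∀ (vis : PySem.Set String),
    ∀ x ∈ (collectNew vis ns).1, x ∈ ns := by
  induction ns with
  | nil => intro vis x hx; simp [collectNew] at hx
  | cons nb rest ih =>
    intro vis x hx
    simp only [collectNew] at hx
    split at hx
    · exact List.mem_cons_of_mem _ (ih vis x hx)
    · simp only [List.mem_cons] at hx ⊢
      rcases hx with h | h
      · exact Or.inl h
      · exact Or.inr (ih _ x h)

theorem collectNew_snd (ns : List String) : ∀ (vis : PySem.Set String),
    (collectNew vis ns).2 = vis ++ (collectNew vis ns).1 := by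
  induction ns with
  | nil => intro vis; simp [collectNew]
  | cons nb rest ih =>
    intro vis
    simp only [collectNew]
    split
    · exact ih vis
    · rename_i h
      have hnm : nb ∉ vis := by simpa using h
      have hadd : PySem.Set.add vis nb = vis ++ [nb] := by
        simp [PySem.Set.add, hnm]
      rw [hadd, ih]
      simp

theorem collectNew_snd_nodup (ns : List String) : ∀ (vis : PySem.Set String),
    vis.Nodup → (collectNew vis ns).2.Nodup := by
  induction ns with
  | nil => intro vis h; simpa [collectNew] using h
  | cons nb rest ih =>
    intro vis h
    simp only [collectNew]
    split
    · exact ih vis h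
    · rename_i hc
      have hnm : nb ∉ vis := by simpa using hc
      have hadd : PySem.Set.add vis nb = vis ++ [nb] := by
        simp [PySem.Set.add, hnm]
      refine ih _ ?_
      rw [hadd]
      exact List.Nodup.append h (List.nodup_singleton nb)
        (by intro a ha hb; simp at hb; exact hnm (hb ▸ ha))

theorem foldA_eq (ns : List String) : ∀ (q : List (String × Int)) (vis : PySem.Set String) (dd : Int),
    ns.foldl (fun (acc : List (String × Int) × PySem.Set String) fr =>
        if PySem.Set.contains acc.2 fr then acc
        else (acc.1 ++ [(fr, dd)], PySem.Set.add acc.2 fr)) (q, vis)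
    = (q ++ (collectNew vis ns).1.map (fun x => (x, dd)), (collectNew vis ns).2) := by
  induction ns with
  | nil => intro q vis dd; simp [collectNew]
  | cons nb rest ih =>
    intro q vis dd
    simp only [List.foldl_cons, collectNew]
    split
    · exact ih q vis dd
    · simp only [ih (q ++ [(nb, dd)]) (PySem.Set.add vis nb) dd, List.map_cons,
        List.append_assoc, List.singleton_append]

theorem foldB_eq (ns : List String) : ∀ (acc : List String) (vis : PySem.Set String),
    ns.foldl (fun (acc2 : List String × PySem.Set String) nb =>
        if PySem.Set.contains acc2.2 nb then acc2
        else (acc2.1 ++ [nb], PySem.Set.add acc2.2 nb)) (acc, vis)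
    = (acc ++ (collectNew vis ns).1, (collectNew vis ns).2) := by
  induction ns with
  | nil => intro acc vis; simp [collectNew]
  | cons nb rest ih =>
    intro acc vis
    simp only [List.foldl_cons, collectNew]
    split
    · exact ih acc vis
    · simp only [ih (acc ++ [nb]) (PySem.Set.add vis nb),
        List.append_assoc, List.singleton_append]

theorem pvExpand_aux (g : List (String × List String)) (F : List String) :
    ∀ (acc : List String) (vis : PySem.Set String),
    F.foldl (fun acc node =>
      (pvNbrs g node).foldl (fun (acc2 : List String × PySem.Set String) nb =>
        if PySem.Set.contains acc2.2 nb then acc2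
        else (acc2.1 ++ [nb], PySem.Set.add acc2.2 nb)) acc) (acc, vis)
    = (acc ++ (collectLevel g vis F).1, (collectLevel g vis F).2) := by
  induction F with
  | nil => intro acc vis; simp [collectLevel]
  | cons c rest ih =>
    intro acc vis
    simp only [List.foldl_cons, collectLevel, foldB_eq]
    simp only [ih, List.append_assoc]

theorem pvExpand_eq (g : List (String × List String)) (F : List String) (vis : PySem.Set String) :
    pvExpand g F vis = ((collectLevel g vis F).1, (collectLevel g vis F).2) := by
  unfold pvExpand
  rw [pvExpand_aux g F [] vis]
  simp

theorem collectLevel_snd (g : List (String × List String)) (F : List String) :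
    ∀ (vis : PySem.Set String),
    (collectLevel g vis F).2 = vis ++ (collectLevel g vis F).1 := by
  induction F with
  | nil => intro vis; simp [collectLevel]
  | cons c rest ih =>
    intro vis
    simp only [collectLevel]
    rw [ih, collectNew_snd, List.append_assoc]

theorem collectLevel_snd_nodup (g : List (String × List String)) (F : List String) :
    ∀ (vis : PySem.Set String), vis.Nodup → (collectLevel g vis F).2.Nodup := by
  induction F with
  | nil => intro vis h; simpa [collectLevel] using h
  | cons c rest ih =>
    intro vis h
    simp only [collectLevel]
    exact ih _ (collectNew_snd_nodup _ _ h)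

theorem collectLevel_fst_nbrs (g : List (String × List String)) (F : List String) :
    ∀ (vis : PySem.Set String), ∀ x ∈ (collectLevel g vis F).1, ∃ c, x ∈ pvNbrs g c := by
  induction F with
  | nil => intro vis x hx; simp [collectLevel] at hx
  | cons c rest ih =>
    intro vis x hx
    simp only [collectLevel, List.mem_append] at hx
    rcases hx with h | h
    · exact ⟨c, collectNew_fst_subset _ _ x h⟩
    · exact ih _ x h

theorem pvNbrs_mem_flatMap (g : List (String × List String)) (c : String) :
    ∀ x ∈ pvNbrs g c, x ∈ g.flatMap Prod.snd := by
  induction g with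
  | nil => intro x hx; simp [pvNbrs, PySem.Dict.get?] at hx
  | cons p rest ih =>
    intro x hx
    obtain ⟨k, v⟩ := p
    simp only [pvNbrs, PySem.Dict.get?_mk_cons] at hx
    simp only [List.flatMap_cons, List.mem_append]
    by_cases hk : (k == c) = true
    · simp [hk] at hx; exact Or.inl hx
    · simp only [hk] at hx
      exact Or.inr (ih x hx)

theorem nodup_subset_length_le (l U : List String) (h : l.Nodup) (hs : l ⊆ U) :
    l.length ≤ U.length := by
  calc l.length = l.toFinset.card := (List.toFinset_card_of_nodup h).symm
    _ ≤ U.toFinset.card := Finset.card_le_card (by intro x hx; simp at hx ⊢; exact hs hx)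
    _ ≤ U.length := U.toFinset_card_le

theorem bfsA_nil (g : List (String × List String)) (t : String) (f : Nat)
    (vis : PySem.Set String) : bfsA g t f [] vis = -1 := by
  cases f <;> simp [bfsA]

theorem bfsA_level_found (g : List (String × List String)) (t : String) (F : List String) :
    ∀ (N : List (String × Int)) (vis : PySem.Set String) (f : Nat) (d : Int),
    t ∈ F →
    bfsA g t (F.length + f) (F.map (fun c => (c, d)) ++ N) vis = d := by
  induction F with
  | nil => intro N vis f d h; simp at h
  | cons c rest ih =>
    intro N vis f d h
    have : (c :: rest).length + f = (rest.length + f) + 1 := by simp; omega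
    rw [this]
    simp only [List.map_cons, List.cons_append, bfsA]
    by_cases hc : c = t
    · simp [hc]
    · simp only [hc, if_false]
      rw [foldA_eq]
      have hmem : t ∈ rest := by
        rcases List.mem_cons.mp h with h1 | h1
        · exact absurd h1.symm hc
        · exact h1
      have := ih (N ++ (collectNew vis (pvNbrs g c)).1.map (fun x => (x, d + 1)))
        (collectNew vis (pvNbrs g c)).2 f d hmem
      simpa [List.append_assoc] using this

theorem bfsA_level_notfound (g : List (String × List String)) (t : String) (F : List String) :
    ∀ (N : List (String × Int)) (vis : PySem.Set String) (f : Nat) (d : Int),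
    t ∉ F →
    bfsA g t (F.length + f) (F.map (fun c => (c, d)) ++ N) vis
      = bfsA g t f (N ++ (collectLevel g vis F).1.map (fun c => (c, d + 1)))
          (collectLevel g vis F).2 := by
  induction F with
  | nil => intro N vis f d h; simp [collectLevel]
  | cons c rest ih =>
    intro N vis f d h
    have hlen : (c :: rest).length + f = (rest.length + f) + 1 := by simp; omega
    rw [hlen]
    simp only [List.map_cons, List.cons_append, bfsA]
    have hc : ¬ c = t := by
      intro hc; exact h (by simp [hc])
    simp only [hc, if_false]
    rw [foldA_eq]
    have hrest : t ∉ rest := fun hm => h (List.mem_cons_of_mem _ hm)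
    have := ih (N ++ (collectNew vis (pvNbrs g c)).1.map (fun x => (x, d + 1)))
      (collectNew vis (pvNbrs g c)).2 f d hrest
    rw [show (rest.map (fun c => (c, d)) ++ N) ++
          (collectNew vis (pvNbrs g c)).1.map (fun x => (x, d + 1))
        = rest.map (fun c => (c, d)) ++
          (N ++ (collectNew vis (pvNbrs g c)).1.map (fun x => (x, d + 1))) by
      simp [List.append_assoc]]
    rw [this]
    simp only [collectLevel, List.map_append, List.append_assoc]

theorem bfs_main (g : List (String × List String)) (t : String) (U : List String)
    (hU : ∀ c, ∀ x ∈ pvNbrs g c, x ∈ U) :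
    ∀ (fB fA : Nat) (F : List String) (vis : PySem.Set String) (d : Int),
    vis.Nodup → vis ⊆ U →
    F.length + (U.length - vis.length) ≤ fA →
    1 + (U.length - vis.length) ≤ fB →
    bfsA g t fA (F.map (fun c => (c, d))) vis = bfsB g t fB F vis d := by
  intro fB
  induction fB with
  | zero => intro fA F vis d _ _ _ hfB; omega
  | succ f ih =>
    intro fA F vis d hnd hsub hfA hfB
    match F with
    | [] =>
      rw [List.map_nil, bfsA_nil]
      simp [bfsB]
    | c :: rest =>
      by_cases hmem : t ∈ c :: rest
      · have hA := bfsA_level_found g t (c :: rest) [] vis (fA - (c :: rest).length) d hmem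
        rw [List.append_nil] at hA
        rw [show (c :: rest).length + (fA - (c :: rest).length) = fA by omega] at hA
        rw [hA]
        simp [bfsB, hmem]
      · have hA := bfsA_level_notfound g t (c :: rest) [] vis (fA - (c :: rest).length) d hmem
        rw [List.append_nil] at hA
        rw [show (c :: rest).length + (fA - (c :: rest).length) = fA by
          simp only [List.length_cons] at hfA ⊢; omega] at hA
        have hB : bfsB g t (f + 1) (c :: rest) vis d
            = bfsB g t f (collectLevel g vis (c :: rest)).1
                (collectLevel g vis (c :: rest)).2 (d + 1) := by
          simp [bfsB, hmem, pvExpand_eq]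
        rw [hA, hB, List.nil_append]
        have hsnd := collectLevel_snd g (c :: rest) vis
        have hnd' := collectLevel_snd_nodup g (c :: rest) vis hnd
        have hsub' : (collectLevel g vis (c :: rest)).2 ⊆ U := by
          rw [hsnd]; intro x hx
          rcases List.mem_append.mp hx with h1 | h1
          · exact hsub h1
          · obtain ⟨cc, hcc⟩ := collectLevel_fst_nbrs g (c :: rest) vis x h1
            exact hU cc x hcc
        have hlen' : (collectLevel g vis (c :: rest)).2.length
            = vis.length + (collectLevel g vis (c :: rest)).1.length := by
          rw [hsnd]; simp
        have hUb := nodup_subset_length_le _ U hnd' hsub'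
        rcases hnil : (collectLevel g vis (c :: rest)).1 with _ | ⟨nb, nrest⟩
        · rw [List.map_nil, bfsA_nil]
          cases f <;> simp [bfsB]
        · rw [hnil] at hlen'
          exact ih (fA - (c :: rest).length) (nb :: nrest) _ (d + 1) hnd' hsub'
            (by simp only [List.length_cons] at *; omega)
            (by simp only [List.length_cons] at *; omega)

-- ===== VERDICT (by name: the statement is the Claim_ definition above) =====
theorem get_connection_distance_spec : Claim_equal_get_connection_distance := by
  intro g s t _
  unfold Spec_get_connection_distance get_connection_distance get_connection_distance_alt
  split
  · rfl
  · split
    · rfl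
    · exact bfs_main g t (s :: g.flatMap Prod.snd)
        (fun c x hx => List.mem_cons_of_mem _ (pvNbrs_mem_flatMap g c x hx))
        (pvFuel g) (pvFuel g) [s] (PySem.Set.ofList [s]) 0
        (by simp [PySem.Set.ofList, PySem.Set.add, PySem.Set.empty])
        (by intro x hx; simp [PySem.Set.ofList, PySem.Set.add, PySem.Set.empty] at hx; simp [hx])
        (by simp [pvFuel, PySem.Set.ofList, PySem.Set.add, PySem.Set.empty]; omega)
        (by simp [pvFuel, PySem.Set.ofList, PySem.Set.add, PySem.Set.empty]; omega)
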